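-- pv_equiv track=rewrite | github.com/SCoureFoure/magic-deck-builder | src/engine/lands.py | calculate_land_distribution
-- ===== SOURCE A (Python) =====
-- def calculate_land_distribution(
--     color_identity: list[str], total_lands: int = 37
-- ) -> dict[str, int]:
--     """Calculate basic land distribution for a Commander deck.
--
--     Based on Riftgate MTG Land Calculator methodology:
--     https://riftgate.com/pages/mtg-land-calculator
--
--     For MVP, uses equal distribution across colors. Future enhancement
--     would weight by color pip requirements in mana costs.
--
--     Args:
--         color_identity: List of color letters (e.g., ["W", "U", "B"])
--         total_lands: Total lands to distribute (default 37 for Commander)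
--
--     Returns:
--         Dictionary mapping color to land count (e.g., {"W": 12, "U": 13, "B": 12})
--         For multicolor, reserves 1 slot for Command Tower (returned separately)
--     """
--     if not color_identity:
--         # Colorless commander - all basics (Wastes)
--         return {"C": total_lands}
--
--     num_colors = len(color_identity)
--
--     if num_colors == 1:
--         # Monocolor - all basics of that color
--         return {color_identity[0]: total_lands}
--
--     # Multicolor - reserve 1 for Command Tower, distribute rest equally
--     basics_count = total_lands - 1  # Reserve 1 for Command Tower
--     lands_per_color = basics_count // num_colors
--     remainder = basics_count % num_colors
--
--     distribution: dict[str, int] = {}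
--     for i, color in enumerate(sorted(color_identity)):
--         # Distribute remainder to first N colors alphabetically
--         distribution[color] = lands_per_color + (1 if i < remainder else 0)
--
--     return distribution
-- ===== SOURCE B (Python) =====
-- def calculate_land_distribution(
--     color_identity: list[str], total_lands: int = 37
-- ) -> dict[str, int]:
--     if not color_identity:
--         return {"C": total_lands}
--     if len(color_identity) == 1:
--         return {color_identity[0]: total_lands}
--     # Multicolor: reserve 1 for Command Tower, then hand out ceil shares of a
--     # running remainder -- front-loads extras onto the alphabetically first colors.
--     distribution: dict[str, int] = {}
--     remaining = total_lands - 1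
--     remaining_colors = len(color_identity)
--     for color in sorted(color_identity):
--         share = -(-remaining // remaining_colors)
--         distribution[color] = share
--         remaining -= share
--         remaining_colors -= 1
--     return distribution
-- ===== Notes on version B (the rewrite author's own statement) =====
-- stated objective: alternative
-- what changed: B drops the precomputed lands_per_color/remainder and enumerate index threshold; it maintains a running (remaining, remaining_colors) state and gives each sorted color a ceiling share -(-remaining // remaining_colors), proved equal to A's quotient-plus-remainder-to-first-N allocation.
import Mathlib
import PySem

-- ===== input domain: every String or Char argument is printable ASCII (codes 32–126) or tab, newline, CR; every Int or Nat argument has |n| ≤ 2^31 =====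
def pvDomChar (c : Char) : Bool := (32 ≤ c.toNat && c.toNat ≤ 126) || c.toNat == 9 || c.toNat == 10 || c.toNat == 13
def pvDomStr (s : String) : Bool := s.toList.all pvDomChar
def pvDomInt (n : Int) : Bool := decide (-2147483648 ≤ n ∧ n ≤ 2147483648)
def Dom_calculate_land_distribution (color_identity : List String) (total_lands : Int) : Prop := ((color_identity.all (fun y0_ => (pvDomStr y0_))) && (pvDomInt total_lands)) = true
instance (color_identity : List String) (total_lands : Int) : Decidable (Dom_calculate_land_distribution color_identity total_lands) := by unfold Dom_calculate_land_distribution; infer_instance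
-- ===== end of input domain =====

-- B replaces A's precomputed quotient/remainder + index threshold by a running
-- remainder handing out ceiling shares; same cost, different decomposition.

-- ===== PORT A =====
def calculate_land_distribution (color_identity : List String) (total_lands : Int) : List (String × Int) :=
  if color_identity.isEmpty then
    (PySem.Dict.ofList [("C", total_lands)]).items
  else
    let num_colors : Int := color_identity.length
    if num_colors = 1 then
      (PySem.Dict.ofList [(PySem.List.pyGetD color_identity 0 "", total_lands)]).items
    else
      let basics_count := total_lands - 1
      let lands_per_color := PySem.Int.floordiv basics_count num_colors
      let remainder := PySem.Int.mod basics_count num_colors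
      let distribution : PySem.Dict String Int :=
        (PySem.List.enumerate (PySem.List.sorted color_identity (fun x => x) false) 0).foldl
          (fun d p => d.insert p.2 (lands_per_color + (if p.1 < remainder then 1 else 0)))
          PySem.Dict.empty
      distribution.items

-- ===== PORT B =====
def calculate_land_distribution_alt (color_identity : List String) (total_lands : Int) : List (String × Int) :=
  if color_identity.isEmpty then
    (PySem.Dict.ofList [("C", total_lands)]).items
  else
    if color_identity.length = 1 then
      (PySem.Dict.ofList [(PySem.List.pyGetD color_identity 0 "", total_lands)]).items
    else
      let st : PySem.Dict String Int × Int × Int :=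
        (PySem.List.sorted color_identity (fun x => x) false).foldl
          (fun s color =>
            let share := -(PySem.Int.floordiv (-s.2.1) s.2.2)
            (s.1.insert color share, s.2.1 - share, s.2.2 - 1))
          (PySem.Dict.empty, total_lands - 1, (color_identity.length : Int))
      st.1.items

-- ===== PRECONDITION & SPEC =====
def Spec_calculate_land_distribution (color_identity : List String) (total_lands : Int) (out : List (String × Int)) : Prop := out = calculate_land_distribution_alt color_identity total_lands
instance (color_identity : List String) (total_lands : Int) (out : List (String × Int)) : Decidable (Spec_calculate_land_distribution color_identity total_lands out) := by unfold Spec_calculate_land_distribution; infer_instance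

-- ===== CLAIM (what is proved, stated in full; the proofs are below) =====
def Claim_equal_calculate_land_distribution : Prop := ∀ (color_identity : List String) (total_lands : Int), Dom_calculate_land_distribution color_identity total_lands → Spec_calculate_land_distribution color_identity total_lands (calculate_land_distribution color_identity total_lands)

-- ===== LEMMAS AND PROOFS =====

-- The ceiling share of the running remainder equals A's per-index share.
lemma share_eq (b n i : Int) (hn : 0 < n) (_hi : 0 ≤ i) (hin : i < n) :
    -(PySem.Int.floordiv (-(b - i * PySem.Int.floordiv b n - min i (PySem.Int.mod b n))) (n - i))
      = PySem.Int.floordiv b n + (if i < PySem.Int.mod b n then 1 else 0) := by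
  set q := PySem.Int.floordiv b n with hq
  set r := PySem.Int.mod b n with hr
  have hb : q * n + r = b := PySem.Int.floordiv_mul_add_mod b n
  have hr0 : 0 ≤ r := PySem.Int.mod_nonneg b hn
  have hrn : r < n := PySem.Int.mod_lt b hn
  rw [PySem.Int.neg_floordiv_neg_eq_iff_of_pos (show (0:Int) < n - i by omega)]
  by_cases h : i < r
  · simp only [if_pos h]
    have hmin : min i r = i := by omega
    rw [hmin]
    constructor
    · nlinarith
    · nlinarith
  · simp only [if_neg h]
    have hmin : min i r = r := by omega
    rw [hmin]
    constructor
    · nlinarith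
    · nlinarith

-- The two loops produce the same dict from any aligned intermediate state.
lemma loop_eq (b n : Int) (L : List String) : ∀ (i : Nat) (d : PySem.Dict String Int),
    (i : Int) + L.length = n →
    (PySem.List.enumerate L (i : Int)).foldl
        (fun d p => d.insert p.2 (PySem.Int.floordiv b n + (if p.1 < PySem.Int.mod b n then 1 else 0))) d
      = (L.foldl
          (fun (s : PySem.Dict String Int × Int × Int) color =>
            let share := -(PySem.Int.floordiv (-s.2.1) s.2.2)
            (s.1.insert color share, s.2.1 - share, s.2.2 - 1))
          (d, b - (i : Int) * PySem.Int.floordiv b n - min (i : Int) (PySem.Int.mod b n), n - (i : Int))).1 := by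
  induction L with
  | nil => intro i d _; simp [PySem.List.enumerate_nil]
  | cons c L' ih =>
    intro i d hlen
    have hn : 0 < n := by simp at hlen; omega
    have hin : (i : Int) < n := by simp at hlen; omega
    have hsh := share_eq b n (i : Int) hn (by positivity) hin
    rw [PySem.List.enumerate_cons]
    simp only [List.foldl_cons]
    rw [hsh]
    set q := PySem.Int.floordiv b n with hq
    set r := PySem.Int.mod b n with hr
    have hr0 : 0 ≤ r := PySem.Int.mod_nonneg b hn
    have hrn : r < n := PySem.Int.mod_lt b hn
    have h2 := ih (i + 1) (d.insert c (q + (if (i : Int) < r then 1 else 0)))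
      (by simp at hlen ⊢; omega)
    have hrem : b - (i : Int) * q - min (i : Int) r - (q + (if (i : Int) < r then 1 else 0))
        = b - ((i : Nat) + 1 : Int) * q - min ((i : Nat) + 1 : Int) r := by
      by_cases h : (i : Int) < r
      · simp only [if_pos h]
        have h1 : min (i : Int) r = (i : Int) := by omega
        have h2' : min ((i : Nat) + 1 : Int) r = (i : Int) + 1 := by omega
        rw [h1, h2']; ring
      · simp only [if_neg h]
        have h1 : min (i : Int) r = r := by omega
        have h2' : min ((i : Nat) + 1 : Int) r = r := by omega
        rw [h1, h2']; ring
    have hcast : ((i + 1 : Nat) : Int) = (i : Int) + 1 := by push_cast; ring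
    rw [hcast] at h2
    rw [h2, ← hrem]
    ring_nf

-- ===== VERDICT (by name: the statement is the Claim_ definition above) =====
theorem calculate_land_distribution_spec : Claim_equal_calculate_land_distribution := by
  intro ci tl _
  unfold Spec_calculate_land_distribution calculate_land_distribution calculate_land_distribution_alt
  by_cases h0 : ci.isEmpty
  · simp [h0]
  · simp only [h0]
    by_cases h1 : ci.length = 1
    · simp [h1]
    · have h1' : (ci.length : Int) ≠ 1 := by exact_mod_cast h1
      simp only [h1, h1', if_false]
      have hlen : (PySem.List.sorted ci (fun x => x) false).length = ci.length :=
        PySem.List.length_sorted ci (fun x => x) false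
      have hne : ci ≠ [] := by simpa [List.isEmpty_iff] using h0
      have hn : (0 : Int) < (ci.length : Int) := by
        have := List.length_pos_of_ne_nil hne
        exact_mod_cast this
      have hm0 : (0 : Int) ≤ PySem.Int.mod (tl - 1) (ci.length : Int) :=
        PySem.Int.mod_nonneg _ hn
      have hmin : min (0 : Int) (PySem.Int.mod (tl - 1) (ci.length : Int)) = 0 :=
        min_eq_left hm0
      have := loop_eq (tl - 1) (ci.length : Int) (PySem.List.sorted ci (fun x => x) false)
        0 PySem.Dict.empty (by rw [hlen]; push_cast; ring)
      simp only [Nat.cast_zero, zero_mul, hmin, sub_zero] at this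
      rw [this]
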